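-- pv_equiv track=rewrite | github.com/gustavolpfa/TDD_Beecrowd | TDD_Beecrowd1132/Beecrowd_1132.py | soma_muts
-- ===== SOURCE A (Python) =====
-- def soma_muts(a, b):
--     soma = 0
--     if a > b:
--         a,b =b,a
--     for loop in range(a,b+1):
--         if not (loop%13==0):
--             soma=soma+loop
--     return soma
-- ===== SOURCE B (Python) =====
-- def soma_muts(a, b):
--     if a > b:
--         a, b = b, a
--     total = (a + b) * (b - a + 1) // 2
--     lo = -((-a) // 13)   # smallest multiple index: ceil(a/13)
--     hi = b // 13         # largest multiple index: floor(b/13)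
--     if lo > hi:
--         return total
--     return total - 13 * ((lo + hi) * (hi - lo + 1) // 2)
-- ===== Notes on version B (the rewrite author's own statement) =====
-- stated objective: faster
-- what changed: Replaces the O(b-a) loop over range(a,b+1) by a closed-form arithmetic series: Gauss sum of [a,b] minus 13 times the Gauss sum of the multiple indices.
import Mathlib
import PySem

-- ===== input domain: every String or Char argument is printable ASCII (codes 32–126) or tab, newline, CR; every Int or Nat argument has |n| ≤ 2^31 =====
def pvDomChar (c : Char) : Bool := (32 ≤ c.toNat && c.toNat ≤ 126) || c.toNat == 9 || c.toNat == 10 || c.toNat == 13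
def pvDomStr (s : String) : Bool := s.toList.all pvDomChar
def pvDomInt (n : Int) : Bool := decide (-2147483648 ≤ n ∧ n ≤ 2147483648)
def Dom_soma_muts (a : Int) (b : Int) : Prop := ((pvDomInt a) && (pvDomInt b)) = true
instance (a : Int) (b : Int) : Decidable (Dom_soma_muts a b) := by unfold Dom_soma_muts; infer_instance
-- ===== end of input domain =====

-- B replaces A's O(b-a) loop by closed-form arithmetic series (Gauss sum minus 13·Gauss sum of the multiple indices).

-- ===== PORT A =====
def soma_muts (a : Int) (b : Int) : Int :=
  -- soma = 0; if a > b: a,b = b,a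
  let p := if a > b then (b, a) else (a, b)
  -- for loop in range(a, b+1): if not (loop % 13 == 0): soma = soma + loop
  (PySem.List.pyRange p.1 (p.2 + 1) 1).foldl
    (fun soma loop => if ¬ (PySem.Int.mod loop 13 = 0) then soma + loop else soma) 0

-- ===== PORT B =====
def soma_muts_alt (a : Int) (b : Int) : Int :=
  let p := if a > b then (b, a) else (a, b)
  let a' := p.1
  let b' := p.2
  let total := PySem.Int.floordiv ((a' + b') * (b' - a' + 1)) 2
  let lo := -(PySem.Int.floordiv (-a') 13)
  let hi := PySem.Int.floordiv b' 13
  if lo > hi then total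
  else total - 13 * PySem.Int.floordiv ((lo + hi) * (hi - lo + 1)) 2

-- ===== PRECONDITION & SPEC =====
def Spec_soma_muts (a : Int) (b : Int) (out : Int) : Prop := out = soma_muts_alt a b
instance (a : Int) (b : Int) (out : Int) : Decidable (Spec_soma_muts a b out) := by unfold Spec_soma_muts; infer_instance

-- ===== CLAIM (what is proved, stated in full; the proofs are below) =====
def Claim_equal_soma_muts : Prop := ∀ (a : Int) (b : Int), Dom_soma_muts a b → Spec_soma_muts a b (soma_muts a b)

-- ===== LEMMAS AND PROOFS =====

def pvStep (soma loop : Int) : Int := if ¬ (loop % 13 = 0) then soma + loop else soma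

lemma pvStep_eq : (fun soma loop => if ¬ (PySem.Int.mod loop 13 = 0) then soma + loop else soma) = pvStep := by
  funext s l
  simp only [pvStep, PySem.Int.mod_eq_emod_of_pos (show (0:Int) < 13 by norm_num)]

lemma foldl_pvStep_init (l : List Int) (init : Int) :
    l.foldl pvStep init = init + l.foldl pvStep 0 := by
  induction l generalizing init with
  | nil => simp
  | cons x xs ih =>
      rw [List.foldl_cons, List.foldl_cons, ih, ih (pvStep 0 x)]
      unfold pvStep; split_ifs <;> ring

def pvSum (a b : Int) : Int := (PySem.List.pyRange a (b + 1) 1).foldl pvStep 0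

lemma pvSum_key : ∀ (n : ℕ) (a b : Int), (b + 1 - a).toNat = n → a ≤ b + 1 →
    2 * pvSum a b =
      (a + b) * (b - a + 1)
        - 13 * ((-((-a) / 13) + b / 13) * (b / 13 - (-((-a) / 13)) + 1)) := by
  intro n
  induction n with
  | zero =>
      intro a b hn hab
      have hab' : a = b + 1 := by omega
      subst hab'
      have hlo : -((-(b + 1)) / 13) = b / 13 + 1 := by omega
      rw [pvSum, PySem.List.pyRange_one_eq_nil (by omega), List.foldl_nil, hlo]
      ring
  | succ n ih =>
      intro a b hn hab
      have hab' : a ≤ b := by omega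
      rw [pvSum, PySem.List.pyRange_one_cons (by omega), List.foldl_cons,
        foldl_pvStep_init]
      have ihr := ih (a + 1) b (by omega) (by omega)
      rw [pvSum] at ihr
      by_cases hd : a % 13 = 0
      · have hstep : pvStep 0 a = 0 := by simp [pvStep, hd]
        have h1 : -((-(a + 1)) / 13) = -((-a) / 13) + 1 := by omega
        have h2 : a = 13 * (-((-a) / 13)) := by omega
        rw [h1] at ihr
        rw [hstep]
        linear_combination ihr - 2 * h2
      · have hstep : pvStep 0 a = a := by simp [pvStep, hd]
        have h1 : -((-(a + 1)) / 13) = -((-a) / 13) := by omega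
        rw [h1] at ihr
        rw [hstep]
        linear_combination ihr

lemma pvSum_closed (a b : Int) (hab : a ≤ b) :
    pvSum a b = soma_muts_alt a b := by
  have key := pvSum_key (b + 1 - a).toNat a b rfl (by omega)
  set lo := -((-a) / 13) with hlo
  set hi := b / 13 with hhi
  have hQeven : Even ((lo + hi) * (hi - lo + 1)) := by
    rcases Int.even_or_odd (lo + hi) with h | h
    · exact h.mul_right _
    · obtain ⟨k, hk⟩ := h
      exact Even.mul_left ⟨hi - k, by omega⟩ _
  have hPeven : Even ((a + b) * (b - a + 1)) := by
    rcases Int.even_or_odd (a + b) with h | h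
    · exact h.mul_right _
    · obtain ⟨k, hk⟩ := h
      exact Even.mul_left ⟨b - k, by omega⟩ _
  obtain ⟨p, hp⟩ := hPeven
  obtain ⟨q, hq⟩ := hQeven
  rw [soma_muts_alt]
  simp only [if_neg (show ¬ a > b by omega),
    PySem.Int.floordiv_eq_ediv_of_pos (show (0:Int) < 2 by norm_num),
    PySem.Int.floordiv_eq_ediv_of_pos (show (0:Int) < 13 by norm_num), ← hlo, ← hhi]
  have hp2 : (a + b) * (b - a + 1) / 2 = p := by omega
  have hq2 : (lo + hi) * (hi - lo + 1) / 2 = q := by omega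
  by_cases hgt : lo > hi
  · have hle : lo ≤ hi + 1 := by omega
    have hlo1 : lo = hi + 1 := by omega
    have hq0 : (lo + hi) * (hi - lo + 1) = 0 := by rw [hlo1]; ring
    rw [if_pos hgt, hp2]
    omega
  · rw [if_neg hgt, hp2, hq2]
    omega

-- ===== VERDICT (by name: the statement is the Claim_ definition above) =====
theorem soma_muts_spec : Claim_equal_soma_muts := by
  intro a b _
  show soma_muts a b = soma_muts_alt a b
  rw [soma_muts, pvStep_eq]
  by_cases h : a > b
  · simp only [if_pos h]
    have hswap : soma_muts_alt a b = soma_muts_alt b a := by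
      rw [soma_muts_alt, soma_muts_alt, if_pos h, if_neg (show ¬ b > a by omega)]
    rw [hswap]
    exact pvSum_closed b a (by omega)
  · simp only [if_neg h]
    exact pvSum_closed a b (by omega)
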